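-- pv_equiv track=rewrite | github.com/selina-bian-1122/AutoDS-Agents | backend/app/dataset_utils.py | _choose_segment
-- ===== SOURCE A (Python) =====
-- from typing import Any
--
-- PREFERRED_SEGMENTS = [
--     'outcome', 'churn', 'continent', 'category', 'region', 'channel', 'contract',
--     'internetservice', 'paymentmethod', 'gender', 'segment', 'country', 'seniorcitizen'
-- ]
--
-- ID_LIKE_TOKENS = ('id', 'code', 'key')
--
-- def _normalize(value: Any) -> str:
--     return str(value).strip() if value is not None else ''
--
-- def _normalized_name(column: str) -> str:
--     return ''.join(character.lower() for character in column if character.isalnum())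
--
-- def _distinct_count(rows: list[dict[str, str]], column: str) -> int:
--     return len({_normalize(row.get(column)) for row in rows if _normalize(row.get(column))})
--
-- def _choose_segment(text_columns: list[str], numeric_columns: list[str], rows: list[dict[str, str]], metric_column: str | None) -> str | None:
--     candidates: list[str] = []
--     candidates.extend(text_columns)
--     for column in numeric_columns:
--         if column == metric_column:
--             continue
--         distinct_count = _distinct_count(rows, column)
--         if 1 < distinct_count <= 8:
--             candidates.append(column)
--
--     if not candidates:
--         return None
--
--     for preferred in PREFERRED_SEGMENTS:
--         for column in candidates:
--             if _normalized_name(column) == preferred and 1 < _distinct_count(rows, column) <= 24: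
--                 return column
--
--     filtered: list[tuple[int, int, str]] = []
--     for column in candidates:
--         normalized = _normalized_name(column)
--         if any(token in normalized for token in ID_LIKE_TOKENS):
--             continue
--         distinct_count = _distinct_count(rows, column)
--         if 1 < distinct_count <= 24:
--             filtered.append((distinct_count, len(normalized), column))
--
--     if filtered:
--         filtered.sort(key=lambda item: (item[0], item[1]))
--         return filtered[0][2]
--     return candidates[0]
-- ===== SOURCE B (Python) =====
-- PREFERRED_SEGMENTS = [
--     'outcome', 'churn', 'continent', 'category', 'region', 'channel', 'contract',
--     'internetservice', 'paymentmethod', 'gender', 'segment', 'country', 'seniorcitizen'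
-- ]
--
-- ID_LIKE_TOKENS = ('id', 'code', 'key')
--
--
-- def _dcount(rows, column):
--     seen = set()
--     for row in rows:
--         value = row.get(column)
--         if value is not None:
--             value = value.strip()
--             if value:
--                 seen.add(value)
--     return len(seen)
--
--
-- def _name(column):
--     return ''.join(ch.lower() for ch in column if ch.isalnum())
--
--
-- def _score(rows, column):
--     """One lexicographic rank per candidate; min() keeps the first minimum,
--     which reproduces every tie-break of the phased search."""
--     name = _name(column)
--     if name in PREFERRED_SEGMENTS:
--         d = _dcount(rows, column)
--         if 1 < d <= 24:
--             return (0, PREFERRED_SEGMENTS.index(name), 0)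
--     if all(token not in name for token in ID_LIKE_TOKENS):
--         d = _dcount(rows, column)
--         if 1 < d <= 24:
--             return (1, d, len(name))
--     return (2, 0, 0)
--
--
-- def _choose_segment(text_columns, numeric_columns, rows, metric_column):
--     candidates = list(text_columns) + [
--         column for column in numeric_columns
--         if column != metric_column and 1 < _dcount(rows, column) <= 8
--     ]
--     if not candidates:
--         return None
--     return min(candidates, key=lambda column: _score(rows, column))
-- ===== Notes on version B (the rewrite author's own statement) =====
-- stated objective: alternative
-- what changed: A's three sequential phases (preferred-list nested scan with early return, then filter+sort+head, then candidates[0]) are replaced by a single scoring function mapping every candidate to one lexicographic rank (tier, detail, detail) and one min() over the candidate list; min's keep-first tie-break reproduces all of A's phase-internal tie-breaks.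
import Mathlib
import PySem

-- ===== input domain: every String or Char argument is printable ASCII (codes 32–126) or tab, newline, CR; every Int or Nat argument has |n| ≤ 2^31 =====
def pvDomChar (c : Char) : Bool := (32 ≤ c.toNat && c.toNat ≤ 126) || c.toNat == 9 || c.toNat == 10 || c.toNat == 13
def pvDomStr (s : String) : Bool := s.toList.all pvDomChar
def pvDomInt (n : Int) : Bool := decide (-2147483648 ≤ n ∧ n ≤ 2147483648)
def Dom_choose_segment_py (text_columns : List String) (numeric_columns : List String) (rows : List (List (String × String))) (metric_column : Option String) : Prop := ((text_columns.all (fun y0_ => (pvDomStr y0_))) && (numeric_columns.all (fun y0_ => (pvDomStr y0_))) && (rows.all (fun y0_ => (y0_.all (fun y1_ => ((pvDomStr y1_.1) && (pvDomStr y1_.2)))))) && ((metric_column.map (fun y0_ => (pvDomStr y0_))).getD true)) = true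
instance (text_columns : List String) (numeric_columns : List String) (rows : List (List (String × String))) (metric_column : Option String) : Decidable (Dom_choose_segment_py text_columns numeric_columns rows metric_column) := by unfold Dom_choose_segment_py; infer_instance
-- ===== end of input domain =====

-- B replaces A's three sequential phases (preferred-list nested scan, filter+sort+head,
-- candidates[0]) by one scoring function giving each candidate a lexicographic rank and a
-- single first-minimum pass (alternative decomposition, same results).

-- ===== PORT A =====
-- module constants (normalized names are handled as List Char)
def pvPreferred : List (List Char) :=
  ["outcome".toList, "churn".toList, "continent".toList, "category".toList, "region".toList,
   "channel".toList, "contract".toList, "internetservice".toList, "paymentmethod".toList,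
   "gender".toList, "segment".toList, "country".toList, "seniorcitizen".toList]

def pvIdTokens : List (List Char) := ["id".toList, "code".toList, "key".toList]

-- _normalized_name: per-character lower after isalnum filter (exact on the ASCII domain)
def pvNormName (col : String) : List Char :=
  (col.toList.filter PySem.Chars.isalnum).map PySem.Chars.lowerChar

-- _normalize(row.get(column)): values are strings, so str(value).strip() = strip; None -> ''
def pvNormVal : Option String → String
  | some s => PySem.Str.strip s
  | none => ""

-- _distinct_count: set comprehension over rows, keeping non-empty normalized values
def pvDistinctA (rows : List (List (String × String))) (col : String) : Nat :=
  (rows.foldl (fun s row =>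
      let v := pvNormVal (PySem.Dict.get? (PySem.Dict.mk row) col)
      if v ≠ "" then PySem.Set.add s v else s)
    PySem.Set.empty).length

-- body of _choose_segment after the candidate-building loop (A's nested scans and sort)
def pvPhasesA (rows : List (List (String × String))) (candidates : List String) : Option String :=
  match candidates with
  | [] => none
  | c0 :: _ =>
    match pvPreferred.findSome? (fun preferred =>
        candidates.find? (fun col =>
          pvNormName col == preferred &&
          decide (1 < pvDistinctA rows col ∧ pvDistinctA rows col ≤ 24))) with
    | some col => some col
    | none =>
      let filtered := candidates.foldl (fun acc col =>
        let n := pvNormName col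
        if pvIdTokens.any (fun t => PySem.Chars.isIn t n) then acc
        else
          let d := pvDistinctA rows col
          if 1 < d ∧ d ≤ 24 then acc ++ [(d, n.length, col)] else acc) []
      match PySem.List.sorted2 filtered (fun t => t.1) (fun t => t.2.1) with
      | [] => some c0
      | t :: _ => some t.2.2

def choose_segment_py (text_columns : List String) (numeric_columns : List String) (rows : List (List (String × String))) (metric_column : Option String) : Option String :=
  pvPhasesA rows (numeric_columns.foldl (fun acc col =>
    if some col == metric_column then acc
    else
      let d := pvDistinctA rows col
      if 1 < d ∧ d ≤ 8 then acc ++ [col] else acc) text_columns)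

-- ===== PORT B =====
-- _dcount: explicit loop building the seen set
def pvDistinctB (rows : List (List (String × String))) (col : String) : Nat :=
  (rows.foldl (fun seen row =>
      match PySem.Dict.get? (PySem.Dict.mk row) col with
      | none => seen
      | some s =>
        let v := PySem.Str.strip s
        if v ≠ "" then PySem.Set.add seen v else seen)
    PySem.Set.empty).length

-- tail of _score after the preferred-name branch fell through
def pvScoreRest (rows : List (List (String × String))) (col : String) (name : List Char) : Nat × Nat × Nat :=
  if pvIdTokens.all (fun t => !PySem.Chars.isIn t name) ∧
      1 < pvDistinctB rows col ∧ pvDistinctB rows col ≤ 24 then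
    (1, pvDistinctB rows col, name.length)
  else (2, 0, 0)

-- _score: 'name in PREFERRED_SEGMENTS' followed by '.index(name)' is ported as one index? match
def pvScore (rows : List (List (String × String))) (col : String) : Nat × Nat × Nat :=
  match PySem.List.index? pvPreferred (pvNormName col) with
  | some r =>
    if 1 < pvDistinctB rows col ∧ pvDistinctB rows col ≤ 24 then (0, r, 0)
    else pvScoreRest rows col (pvNormName col)
  | none => pvScoreRest rows col (pvNormName col)

-- Python's '<' on the three-component score tuples
def pvLt3 (a b : Nat × Nat × Nat) : Bool :=
  decide (a.1 < b.1 ∨ (a.1 = b.1 ∧ (a.2.1 < b.2.1 ∨ (a.2.1 = b.2.1 ∧ a.2.2 < b.2.2))))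

-- one step of Python's min(…, key=…): replace the running minimum only on strictly smaller key
def pvStep {α κ : Type} (lt : κ → κ → Bool) (k : α → κ) (m : Option α) (c : α) : Option α :=
  match m with
  | none => some c
  | some m0 => if lt (k c) (k m0) then some c else some m0

-- min(cs, key=k) with tuple comparison lt: the FIRST minimal element
def pvFMin {α κ : Type} (lt : κ → κ → Bool) (k : α → κ) (cs : List α) : Option α :=
  cs.foldl (pvStep lt k) none

def choose_segment_py_alt (text_columns : List String) (numeric_columns : List String) (rows : List (List (String × String))) (metric_column : Option String) : Option String :=
  let candidates := text_columns ++ numeric_columns.filter (fun col =>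
    !(some col == metric_column) &&
    decide (1 < pvDistinctB rows col ∧ pvDistinctB rows col ≤ 8))
  if candidates.isEmpty then none
  else pvFMin pvLt3 (pvScore rows) candidates

-- ===== PRECONDITION & SPEC =====
def Spec_choose_segment_py (text_columns : List String) (numeric_columns : List String) (rows : List (List (String × String))) (metric_column : Option String) (out : Option String) : Prop := out = choose_segment_py_alt text_columns numeric_columns rows metric_column
instance (text_columns : List String) (numeric_columns : List String) (rows : List (List (String × String))) (metric_column : Option String) (out : Option String) : Decidable (Spec_choose_segment_py text_columns numeric_columns rows metric_column out) := by unfold Spec_choose_segment_py; infer_instance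

-- ===== CLAIM (what is proved, stated in full; the proofs are below) =====
def Claim_equal_choose_segment_py : Prop := ∀ (text_columns : List String) (numeric_columns : List String) (rows : List (List (String × String))) (metric_column : Option String), Dom_choose_segment_py text_columns numeric_columns rows metric_column → Spec_choose_segment_py text_columns numeric_columns rows metric_column (choose_segment_py text_columns numeric_columns rows metric_column)

-- ===== LEMMAS AND PROOFS =====

-- the two distinct counters agree
theorem pvDistinct_eq (rows : List (List (String × String))) (col : String) :
    pvDistinctB rows col = pvDistinctA rows col := by
  unfold pvDistinctA pvDistinctB
  congr 2
  funext s row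
  cases h : PySem.Dict.get? (PySem.Dict.mk row) col <;> simp [pvNormVal]

-- A's filter test in the fallback phase, as one Bool
def pvKeeps (rows : List (List (String × String))) (col : String) : Bool :=
  pvIdTokens.all (fun t => !PySem.Chars.isIn t (pvNormName col)) &&
  decide (1 < pvDistinctA rows col ∧ pvDistinctA rows col ≤ 24)

-- ---------- generic facts about the keep-first minimum fold ----------

theorem pvFMin_stay {α κ : Type} (lt : κ → κ → Bool) (k : α → κ) (c : α) (bs : List α)
    (h : ∀ b ∈ bs, lt (k b) (k c) = false) :
    bs.foldl (pvStep lt k) (some c) = some c := by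
  induction bs with
  | nil => rfl
  | cons b bs ih =>
    have hb := h b (List.mem_cons_self)
    simp only [List.foldl_cons, pvStep, hb, Bool.false_eq_true, if_false]
    exact ih (fun x hx => h x (List.mem_cons_of_mem _ hx))

theorem pvFMin_spec {α κ : Type} (lt : κ → κ → Bool) (k : α → κ) (as bs : List α) (c : α)
    (h1 : ∀ a ∈ as, lt (k c) (k a) = true) (h2 : ∀ b ∈ bs, lt (k b) (k c) = false) :
    pvFMin lt k (as ++ c :: bs) = some c := by
  have key : ∀ (l : List α) (acc : Option α),
      (∀ a ∈ l, lt (k c) (k a) = true) →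
      (acc = none ∨ ∃ m, acc = some m ∧ lt (k c) (k m) = true) →
      (l ++ c :: bs).foldl (pvStep lt k) acc = some c := by
    intro l
    induction l with
    | nil =>
      intro acc _ hacc
      rcases hacc with rfl | ⟨m, rfl, hm⟩
      · simp only [List.nil_append, List.foldl_cons, pvStep]
        exact pvFMin_stay lt k c bs h2
      · simp only [List.nil_append, List.foldl_cons, pvStep, hm, if_true]
        exact pvFMin_stay lt k c bs h2
    | cons a l ih =>
      intro acc h1 hacc
      simp only [List.cons_append, List.foldl_cons]
      refine ih _ (fun x hx => h1 x (List.mem_cons_of_mem _ hx)) ?_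
      have ha := h1 a (List.mem_cons_self)
      rcases hacc with rfl | ⟨m, rfl, hm⟩
      · exact Or.inr ⟨a, rfl, ha⟩
      · cases hlt : lt (k a) (k m) with
        | true => exact Or.inr ⟨a, by simp [pvStep, hlt], ha⟩
        | false => exact Or.inr ⟨m, by simp [pvStep, hlt], hm⟩
  exact key as none h1 (Or.inl rfl)

theorem pvFMin_aux {α κ : Type} (lt : κ → κ → Bool) (k : α → κ)
    (hco : ∀ x y z : κ, lt x y = true → lt z y = false → lt x z = true)
    (hasym : ∀ x y : κ, lt x y = true → lt y x = false) :
    ∀ (cs : List α) (m c : α), cs.foldl (pvStep lt k) (some m) = some c →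
    (c = m ∧ ∀ b ∈ cs, lt (k b) (k m) = false) ∨
    (∃ as bs, cs = as ++ c :: bs ∧ lt (k c) (k m) = true ∧
      (∀ a ∈ as, lt (k c) (k a) = true) ∧ (∀ b ∈ bs, lt (k b) (k c) = false)) := by
  intro cs
  induction cs with
  | nil => intro m c h; left; exact ⟨(Option.some_inj.mp h).symm, by simp⟩
  | cons x cs ih =>
    intro m c h
    simp only [List.foldl_cons] at h
    cases hlt : lt (k x) (k m) with
    | true =>
      rw [show pvStep lt k (some m) x = some x by simp [pvStep, hlt]] at h
      rcases ih x c h with ⟨rfl, hall⟩ | ⟨as, bs, rfl, hcx, has, hbs⟩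
      · exact Or.inr ⟨[], cs, rfl, hlt, by simp, hall⟩
      · refine Or.inr ⟨x :: as, bs, rfl, ?_, ?_, hbs⟩
        · exact hco (k c) (k x) (k m) hcx (hasym _ _ hlt)
        · intro a ha
          rcases List.mem_cons.mp ha with rfl | ha
          · exact hcx
          · exact has a ha
    | false =>
      rw [show pvStep lt k (some m) x = some m by simp [pvStep, hlt]] at h
      rcases ih m c h with ⟨rfl, hall⟩ | ⟨as, bs, rfl, hcm, has, hbs⟩
      · left
        refine ⟨rfl, ?_⟩
        intro b hb
        rcases List.mem_cons.mp hb with rfl | hb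
        · exact hlt
        · exact hall b hb
      · refine Or.inr ⟨x :: as, bs, rfl, hcm, ?_, hbs⟩
        intro a ha
        rcases List.mem_cons.mp ha with rfl | ha
        · exact hco (k c) (k m) (k a) hcm hlt
        · exact has a ha

theorem pvFMin_decomp {α κ : Type} (lt : κ → κ → Bool) (k : α → κ)
    (hco : ∀ x y z : κ, lt x y = true → lt z y = false → lt x z = true)
    (hasym : ∀ x y : κ, lt x y = true → lt y x = false)
    (cs : List α) (c : α) (h : pvFMin lt k cs = some c) :
    ∃ as bs, cs = as ++ c :: bs ∧
      (∀ a ∈ as, lt (k c) (k a) = true) ∧ (∀ b ∈ bs, lt (k b) (k c) = false) := by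
  cases cs with
  | nil => simp [pvFMin] at h
  | cons x cs =>
    have h' : cs.foldl (pvStep lt k) (some x) = some c := h
    rcases pvFMin_aux lt k hco hasym cs x c h' with ⟨rfl, hall⟩ | ⟨as, bs, rfl, hcx, has, hbs⟩
    · exact ⟨[], cs, rfl, by simp, hall⟩
    · refine ⟨x :: as, bs, rfl, ?_, hbs⟩
      intro a ha
      rcases List.mem_cons.mp ha with rfl | ha
      · exact hcx
      · exact has a ha

theorem pvFMin_ne_none {α κ : Type} (lt : κ → κ → Bool) (k : α → κ) (x : α) (cs : List α) :
    pvFMin lt k (x :: cs) ≠ none := by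
  have aux : ∀ (l : List α) (m : α), ∃ c, l.foldl (pvStep lt k) (some m) = some c := by
    intro l
    induction l with
    | nil => intro m; exact ⟨m, rfl⟩
    | cons y l ih =>
      intro m
      simp only [List.foldl_cons, pvStep]
      cases hlt : lt (k y) (k m) <;> simp only [Bool.false_eq_true, if_false, if_true]
      · exact ih m
      · exact ih y
  intro h
  rcases aux cs x with ⟨c, hc⟩
  rw [pvFMin, List.foldl_cons, show pvStep lt k none x = some x from rfl, hc] at h
  exact Option.some_ne_none c h

-- ---------- order facts for the score tuples ----------

-- min2?'s two-key comparison as one Bool on pairs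
def pvLt2 (a b : Nat × Nat) : Bool :=
  decide (a.1 < b.1) || (!decide (b.1 < a.1) && decide (a.2 < b.2))

theorem min2?_eq_pvFMin {α : Type} (xs : List α) (k1 k2 : α → Nat) :
    PySem.List.min2? xs k1 k2 = pvFMin pvLt2 (fun x => (k1 x, k2 x)) xs := rfl

theorem pvLt2_co (x y z : Nat × Nat) (h1 : pvLt2 x y = true) (h2 : pvLt2 z y = false) :
    pvLt2 x z = true := by
  obtain ⟨x1, x2⟩ := x; obtain ⟨y1, y2⟩ := y; obtain ⟨z1, z2⟩ := z
  simp [pvLt2] at *; omega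

theorem pvLt2_asym (x y : Nat × Nat) (h : pvLt2 x y = true) : pvLt2 y x = false := by
  obtain ⟨x1, x2⟩ := x; obtain ⟨y1, y2⟩ := y
  simp [pvLt2] at *; omega

theorem pvLt3_tier_lt (a b : Nat × Nat × Nat) (h : a.1 < b.1) : pvLt3 a b = true := by
  obtain ⟨x1, x2, x3⟩ := a; obtain ⟨y1, y2, y3⟩ := b
  simp [pvLt3] at *; omega

theorem pvLt3_tier_false (a b : Nat × Nat × Nat) (h : a.1 < b.1) : pvLt3 b a = false := by
  obtain ⟨x1, x2, x3⟩ := a; obtain ⟨y1, y2, y3⟩ := b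
  simp [pvLt3] at *; omega

theorem pvLt3_rank (r r' : Nat) (h : r < r') : pvLt3 (0, r, 0) (0, r', 0) = true := by
  simp [pvLt3]; omega

theorem pvLt3_rank_false (r r' : Nat) (h : r ≤ r') : pvLt3 (0, r', 0) (0, r, 0) = false := by
  simp [pvLt3]; omega

theorem pvLt3_irrefl (a : Nat × Nat × Nat) : pvLt3 a a = false := by
  simp [pvLt3]

theorem pvLt3_of_lt2 (x y : Nat × Nat) (h : pvLt2 x y = true) :
    pvLt3 (1, x) (1, y) = true := by
  obtain ⟨x1, x2⟩ := x; obtain ⟨y1, y2⟩ := y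
  simp [pvLt2, pvLt3] at *; omega

theorem pvLt3_false_of_lt2_false (x y : Nat × Nat) (h : pvLt2 x y = false) :
    pvLt3 (1, x) (1, y) = false := by
  obtain ⟨x1, x2⟩ := x; obtain ⟨y1, y2⟩ := y
  simp [pvLt2, pvLt3] at *; omega

-- ---------- score characterizations ----------

theorem pvScoreRest_fst (rows : List (List (String × String))) (col : String) (name : List Char) :
    1 ≤ (pvScoreRest rows col name).1 := by
  unfold pvScoreRest; split <;> simp

theorem pvScore_eq0 (rows : List (List (String × String))) (c : String) (r : Nat)
    (hidx : PySem.List.index? pvPreferred (pvNormName c) = some r)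
    (hok : 1 < pvDistinctA rows c ∧ pvDistinctA rows c ≤ 24) :
    pvScore rows c = (0, r, 0) := by
  unfold pvScore
  rw [hidx]
  rw [pvDistinct_eq rows c] at *
  simp [hok]

theorem pvScore_rest (rows : List (List (String × String))) (c : String)
    (h : PySem.List.index? pvPreferred (pvNormName c) = none ∨
      ¬(1 < pvDistinctA rows c ∧ pvDistinctA rows c ≤ 24)) :
    pvScore rows c = pvScoreRest rows c (pvNormName c) := by
  unfold pvScore
  cases hidx : PySem.List.index? pvPreferred (pvNormName c) with
  | none => rfl
  | some r =>
    rcases h with h | h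
    · rw [hidx] at h; exact absurd h (by simp)
    · rw [pvDistinct_eq rows c] at *
      simp [h]

theorem pvScoreRest_keeps (rows : List (List (String × String))) (c : String)
    (h : pvKeeps rows c = true) :
    pvScoreRest rows c (pvNormName c) = (1, pvDistinctA rows c, (pvNormName c).length) := by
  unfold pvKeeps at h
  simp only [Bool.and_eq_true, decide_eq_true_eq] at h
  unfold pvScoreRest
  rw [pvDistinct_eq rows c]
  simp [h.1, h.2]

theorem pvScoreRest_not (rows : List (List (String × String))) (c : String)
    (h : pvKeeps rows c = false) :
    pvScoreRest rows c (pvNormName c) = (2, 0, 0) := by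
  unfold pvKeeps at h
  simp only [Bool.and_eq_false_iff, decide_eq_false_iff_not] at h
  unfold pvScoreRest
  rw [pvDistinct_eq rows c]
  rcases h with h | h
  · rw [if_neg]; intro hc; exact absurd h (by simp [hc.1])
  · rw [if_neg]; intro hc; exact h ⟨hc.2.1, hc.2.2⟩

-- ---------- A's fallback phase as min2? of the keeps-filter ----------

-- head of a (non-reversed) two-key sort is the first two-key minimum
theorem pvHead_sorted2 {α : Type} (xs : List α) (k1 k2 : α → Nat) :
    (PySem.List.sorted2 xs k1 k2).head? = PySem.List.min2? xs k1 k2 := by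
  unfold PySem.List.sorted2 PySem.List.min2?
  simp only [Bool.false_eq_true, if_false]
  induction xs using List.reverseRecOn with
  | nil => rfl
  | append_singleton xs x ih =>
    rw [List.foldl_append, List.foldl_append]
    simp only [List.foldl_cons, List.foldl_nil]
    cases hs : List.foldl (fun acc x => PySem.List.insertBy
        (fun a b => decide (k1 a < k1 b) || !decide (k1 b < k1 a) && decide (k2 a < k2 b)) x acc) [] xs with
    | nil =>
      rw [hs] at ih
      simp only [List.head?_nil] at ih
      rw [← ih]
      rfl
    | cons h t =>
      rw [hs] at ih
      simp only [List.head?_cons] at ih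
      rw [← ih]
      simp only [PySem.List.insertBy]
      split <;> rfl

-- min over a mapped list is the mapped min
theorem pvMin2_map {α β : Type} (f : α → β) (xs : List α) (k1 k2 : β → Nat) :
    PySem.List.min2? (xs.map f) k1 k2 = (PySem.List.min2? xs (fun x => k1 (f x)) (fun x => k2 (f x))).map f := by
  unfold PySem.List.min2?
  rw [List.foldl_map]
  suffices h : ∀ (ys : List α) (acc : Option α),
      ys.foldl (fun acc x =>
        match acc with
        | none => some (f x)
        | some m => if (decide (k1 (f x) < k1 m) || !decide (k1 m < k1 (f x)) && decide (k2 (f x) < k2 m)) = true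
            then some (f x) else some m) (acc.map f)
      = (ys.foldl (fun acc x =>
          match acc with
          | none => some x
          | some m => if (decide (k1 (f x) < k1 (f m)) || !decide (k1 (f m) < k1 (f x)) && decide (k2 (f x) < k2 (f m))) = true
              then some x else some m) acc).map f by
    exact h xs none
  intro ys
  induction ys with
  | nil => intro acc; rfl
  | cons y ys ih =>
    intro acc
    cases acc with
    | none => exact ih (some y)
    | some m =>
      simp only [List.foldl_cons, Option.map_some]
      rw [← ih]
      congr 1
      split <;> rfl

-- ---------- the main phase equivalence ----------

theorem pvPhasesA_eq (rows : List (List (String × String))) (cands : List String) :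
    pvPhasesA rows cands = (if cands.isEmpty then none else pvFMin pvLt3 (pvScore rows) cands) := by
  cases hcands0 : cands with
  | nil => rfl
  | cons c0 rest =>
  simp only [List.isEmpty_cons, Bool.false_eq_true, if_false]
  unfold pvPhasesA
  have hnodup : pvPreferred.Nodup := by decide
  cases hfs : pvPreferred.findSome? (fun preferred =>
      (c0 :: rest).find? (fun col =>
        pvNormName col == preferred &&
        decide (1 < pvDistinctA rows col ∧ pvDistinctA rows col ≤ 24))) with
  | some col =>
    -- the preferred phase returned: col is the first candidate of minimal preference rank
    dsimp only
    -- decompose the findSome?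
    have hdec : ∃ P1 p P2, pvPreferred = P1 ++ p :: P2 ∧
        (∀ p' ∈ P1, (c0 :: rest).find? (fun c =>
          pvNormName c == p' && decide (1 < pvDistinctA rows c ∧ pvDistinctA rows c ≤ 24)) = none) ∧
        (c0 :: rest).find? (fun c =>
          pvNormName c == p && decide (1 < pvDistinctA rows c ∧ pvDistinctA rows c ≤ 24)) = some col := by
      clear hnodup
      generalize pvPreferred = P at hfs
      induction P with
      | nil => simp at hfs
      | cons p P ih =>
        rw [List.findSome?_cons] at hfs
        cases hp : (c0 :: rest).find? (fun c =>
            pvNormName c == p && decide (1 < pvDistinctA rows c ∧ pvDistinctA rows c ≤ 24)) with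
        | some y =>
          rw [hp] at hfs
          exact ⟨[], p, P, rfl, by simp, by rw [hp, ← hfs]⟩
        | none =>
          rw [hp] at hfs
          rcases ih hfs with ⟨P1, q, P2, rfl, h1, h2⟩
          refine ⟨p :: P1, q, P2, rfl, ?_, h2⟩
          intro p' hp'
          rcases List.mem_cons.mp hp' with rfl | hp'
          · exact hp
          · exact h1 p' hp'
    rcases hdec with ⟨P1, p, P2, hP, hnoneP1, hfind⟩
    rcases List.find?_eq_some_iff_append.mp hfind with ⟨hpredcol, A1, A2, hsplit, hA1⟩
    simp only [Bool.and_eq_true, beq_iff_eq, decide_eq_true_eq] at hpredcol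
    have hpP1 : p ∉ P1 := by
      rcases List.nodup_append.mp (hP ▸ hnodup) with ⟨-, -, hdisj⟩
      intro hmem
      exact hdisj p hmem p (List.mem_cons_self) rfl
    have hidxp : PySem.List.index? pvPreferred p = some P1.length :=
      (PySem.List.index?_eq_some_iff pvPreferred p P1.length).mpr ⟨P1, P2, hP, rfl, hpP1⟩
    have hgetm : ∀ (v : List Char) (r' : Nat), PySem.List.index? pvPreferred v = some r' →
        pvPreferred[r']? = some v := by
      intro v r' hidx
      rcases (PySem.List.index?_eq_some_iff pvPreferred v r').mp hidx with ⟨pre, suf, hps, hlen, -⟩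
      rw [hps, List.getElem?_append_right (by omega)]
      have h0 : r' - pre.length = 0 := by omega
      rw [h0]
      rfl
    have hep : pvPreferred[P1.length]? = some p := hgetm p P1.length hidxp
    have hscol : pvScore rows col = (0, P1.length, 0) :=
      pvScore_eq0 rows col P1.length (hpredcol.1 ▸ hidxp) hpredcol.2
    -- any candidate whose normalized name sits at rank r' with a qualifying count has r' ≥ P1.length
    have hrank : ∀ c ∈ (c0 :: rest), ∀ r',
        PySem.List.index? pvPreferred (pvNormName c) = some r' →
        (1 < pvDistinctA rows c ∧ pvDistinctA rows c ≤ 24) →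
        P1.length ≤ r' ∧ (r' = P1.length → pvNormName c = p) := by
      intro c hc r' hidx hok
      have hge : pvPreferred[r']? = some (pvNormName c) := hgetm _ _ hidx
      constructor
      · by_contra hlt
        rcases Nat.lt_or_ge r' P1.length with hlt' | hge'
        · have hmem : pvNormName c ∈ P1 := by
            rw [hP, List.getElem?_append_left hlt'] at hge
            exact List.mem_of_getElem? hge
          have := List.find?_eq_none.mp (hnoneP1 (pvNormName c) hmem) c hc
          simp [hok.1, hok.2] at this
        · exact hlt hge'
      · intro hr
        rw [hr, hep] at hge
        exact (Option.some_inj.mp hge).symm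
    have hlt3A1 : ∀ a ∈ A1, pvLt3 (pvScore rows col) (pvScore rows a) = true := by
      intro a ha
      have hamem : a ∈ (c0 :: rest) := by rw [hsplit]; exact List.mem_append_left _ ha
      rw [hscol]
      cases hia : PySem.List.index? pvPreferred (pvNormName a) with
      | none =>
        rw [pvScore_rest rows a (Or.inl hia)]
        exact pvLt3_tier_lt _ _ (by simpa using pvScoreRest_fst rows a (pvNormName a))
      | some r' =>
        by_cases hok : 1 < pvDistinctA rows a ∧ pvDistinctA rows a ≤ 24
        · rw [pvScore_eq0 rows a r' hia hok]
          rcases hrank a hamem r' hia hok with ⟨hge, heq⟩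
          rcases Nat.lt_or_ge P1.length r' with hlt | hle
          · exact pvLt3_rank _ _ hlt
          · have hr : r' = P1.length := by omega
            have hnp := heq hr
            have := hA1 a ha
            simp [hnp, hok.1, hok.2] at this
        · rw [pvScore_rest rows a (Or.inr hok)]
          exact pvLt3_tier_lt _ _ (by simpa using pvScoreRest_fst rows a (pvNormName a))
    have hlt3A2 : ∀ b ∈ A2, pvLt3 (pvScore rows b) (pvScore rows col) = false := by
      intro b hb
      have hbmem : b ∈ (c0 :: rest) := by
        rw [hsplit]; exact List.mem_append_right _ (List.mem_cons_of_mem _ hb)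
      rw [hscol]
      cases hib : PySem.List.index? pvPreferred (pvNormName b) with
      | none =>
        rw [pvScore_rest rows b (Or.inl hib)]
        exact pvLt3_tier_false _ _ (by simpa using pvScoreRest_fst rows b (pvNormName b))
      | some r' =>
        by_cases hok : 1 < pvDistinctA rows b ∧ pvDistinctA rows b ≤ 24
        · rw [pvScore_eq0 rows b r' hib hok]
          exact pvLt3_rank_false _ _ (hrank b hbmem r' hib hok).1
        · rw [pvScore_rest rows b (Or.inr hok)]
          exact pvLt3_tier_false _ _ (by simpa using pvScoreRest_fst rows b (pvNormName b))
    rw [hsplit]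
    exact (pvFMin_spec pvLt3 (pvScore rows) A1 A2 col hlt3A1 hlt3A2).symm
  | none =>
    -- no preferred candidate qualifies anywhere
    dsimp only
    have hnone : ∀ p ∈ pvPreferred, (c0 :: rest).find? (fun c =>
        pvNormName c == p && decide (1 < pvDistinctA rows c ∧ pvDistinctA rows c ≤ 24)) = none :=
      List.findSome?_eq_none_iff.mp hfs
    have hno0 : ∀ c ∈ (c0 :: rest), ∀ r',
        PySem.List.index? pvPreferred (pvNormName c) = some r' →
        ¬(1 < pvDistinctA rows c ∧ pvDistinctA rows c ≤ 24) := by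
      intro c hc r' hidx hok
      rcases PySem.List.getElem_of_index?_eq_some hidx with ⟨hk, hget, -⟩
      have hmem : pvNormName c ∈ pvPreferred := hget ▸ List.getElem_mem _
      have := List.find?_eq_none.mp (hnone _ hmem) c hc
      simp [hok.1, hok.2] at this
    have hscore : ∀ c ∈ (c0 :: rest), pvScore rows c =
        (if pvKeeps rows c then (1, pvDistinctA rows c, (pvNormName c).length) else (2, 0, 0)) := by
      intro c hc
      cases hic : PySem.List.index? pvPreferred (pvNormName c) with
      | none =>
        rw [pvScore_rest rows c (Or.inl hic)]
        cases hk : pvKeeps rows c with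
        | true => simp [pvScoreRest_keeps rows c hk]
        | false => simp [pvScoreRest_not rows c hk]
      | some r' =>
        have hok := hno0 c hc r' hic
        have hk : pvKeeps rows c = false := by
          unfold pvKeeps
          simp only [Bool.and_eq_false_iff, decide_eq_false_iff_not]
          exact Or.inr hok
        rw [pvScore_rest rows c (Or.inr hok), pvScoreRest_not rows c hk, hk]
        simp
    -- the fallback fold is the keeps-filter, mapped to sort keys
    have hfil : (c0 :: rest).foldl (fun acc col =>
          let n := pvNormName col
          if pvIdTokens.any (fun t => PySem.Chars.isIn t n) then acc
          else
            let d := pvDistinctA rows col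
            if 1 < d ∧ d ≤ 24 then acc ++ [(d, n.length, col)] else acc) []
        = ((c0 :: rest).filter (pvKeeps rows)).map
            (fun col => (pvDistinctA rows col, (pvNormName col).length, col)) := by
      have hstep2 : ∀ (acc : List (Nat × Nat × String)) (col : String), col ∈ (c0 :: rest) →
          (let n := pvNormName col
           if pvIdTokens.any (fun t => PySem.Chars.isIn t n) then acc
           else
             let d := pvDistinctA rows col
             if 1 < d ∧ d ≤ 24 then acc ++ [(d, n.length, col)] else acc)
          = if pvKeeps rows col then
              acc ++ [(pvDistinctA rows col, (pvNormName col).length, col)] else acc := by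
        intro acc col _
        cases hT : pvIdTokens.any (fun t => PySem.Chars.isIn t (pvNormName col)) with
        | true =>
          have : pvKeeps rows col = false := by
            unfold pvKeeps
            rcases List.any_eq_true.mp hT with ⟨t, ht, hin⟩
            have hallf : pvIdTokens.all (fun t => !PySem.Chars.isIn t (pvNormName col)) = false := by
              rw [List.all_eq_false]
              exact ⟨t, ht, by simp [hin]⟩
            simp [hallf]
          simp [hT, this]
        | false =>
          have hall : pvIdTokens.all (fun t => !PySem.Chars.isIn t (pvNormName col)) = true := by
            simp only [List.all_eq_true]
            intro t ht
            have := List.any_eq_false.mp hT t ht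
            simp [this]
          by_cases hp : 1 < pvDistinctA rows col ∧ pvDistinctA rows col ≤ 24
          · simp [hT, pvKeeps, hall, hp]
          · simp [hT, pvKeeps, hall, hp]
      exact (PySem.List.foldl_congr_mem _ _ _ _ hstep2).trans
        (by rw [PySem.List.foldl_append_if]; simp)
    rw [hfil]
    have hmatch : ∀ l : List (Nat × Nat × String),
        (match l with | [] => some c0 | t :: _ => some t.2.2)
          = (match l.head? with | none => some c0 | some t => some t.2.2) := by
      intro l; cases l <;> rfl
    rw [hmatch, pvHead_sorted2, pvMin2_map]
    cases hmin : PySem.List.min2? ((c0 :: rest).filter (pvKeeps rows))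
        (fun col => pvDistinctA rows col) (fun col => (pvNormName col).length) with
    | some col =>
      simp only [Option.map_some]
      -- decompose the filtered first minimum and lift it to the full candidate list
      rw [min2?_eq_pvFMin] at hmin
      rcases pvFMin_decomp pvLt2 _ pvLt2_co pvLt2_asym _ col hmin with ⟨fas, fbs, hfeq, hflt, hfge⟩
      rcases List.filter_eq_append_iff.mp (hfeq ▸ rfl :
          (c0 :: rest).filter (pvKeeps rows) = fas ++ (col :: fbs)) with ⟨l1, l2, hl12, hf1, hf2⟩
      rcases List.filter_eq_cons_iff.mp hf2 with ⟨as2, bs2, hl2, has2, hkcol, hfbs2⟩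
      have hcands : (c0 :: rest) = (l1 ++ as2) ++ col :: bs2 := by
        rw [hl12, hl2, List.append_assoc]
      have hscol : pvScore rows col = (1, pvDistinctA rows col, (pvNormName col).length) := by
        rw [hscore col (by rw [hcands]; exact List.mem_append_right _ (List.mem_cons_self)), hkcol]
        simp
      have hlts : ∀ a ∈ l1 ++ as2, pvLt3 (pvScore rows col) (pvScore rows a) = true := by
        intro a ha
        have hamem : a ∈ (c0 :: rest) := by
          rw [hcands]; exact List.mem_append_left _ ha
        rw [hscol, hscore a hamem]
        cases hk : pvKeeps rows a with
        | false => exact pvLt3_tier_lt _ _ (by simp)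
        | true =>
          have hafas : a ∈ fas := by
            rcases List.mem_append.mp ha with h1 | h2
            · rw [← hf1]; exact List.mem_filter.mpr ⟨h1, hk⟩
            · exact absurd hk (by simp [has2 a h2])
          rw [if_pos rfl]
          exact pvLt3_of_lt2 _ _ (hflt a hafas)
      have hges : ∀ b ∈ bs2, pvLt3 (pvScore rows b) (pvScore rows col) = false := by
        intro b hb
        have hbmem : b ∈ (c0 :: rest) := by
          rw [hcands]; exact List.mem_append_right _ (List.mem_cons_of_mem _ hb)
        rw [hscol, hscore b hbmem]
        cases hk : pvKeeps rows b with
        | false => exact pvLt3_tier_false _ _ (by simp)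
        | true =>
          have hbfbs : b ∈ fbs := by rw [← hfbs2]; exact List.mem_filter.mpr ⟨hb, hk⟩
          rw [if_pos rfl]
          exact pvLt3_false_of_lt2_false _ _ (hfge b hbfbs)
      rw [hcands]
      exact (pvFMin_spec pvLt3 (pvScore rows) (l1 ++ as2) bs2 col hlts hges).symm
    | none =>
      -- the filter is empty: every candidate scores (2,0,0) and the first one wins
      simp only [Option.map_none]
      have hfe : (c0 :: rest).filter (pvKeeps rows) = [] := by
        cases hf : (c0 :: rest).filter (pvKeeps rows) with
        | nil => rfl
        | cons x xs =>
          rw [min2?_eq_pvFMin, hf] at hmin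
          exact absurd hmin (by
            intro h
            exact pvFMin_ne_none _ _ x xs h)
      have hallk : ∀ c ∈ (c0 :: rest), pvKeeps rows c = false := by
        intro c hc
        have := List.filter_eq_nil_iff.mp hfe c hc
        simpa using this
      have : pvFMin pvLt3 (pvScore rows) ([] ++ c0 :: rest) = some c0 := by
        apply pvFMin_spec
        · simp
        · intro b hb
          rw [hscore b (List.mem_cons_of_mem _ hb), hscore c0 (List.mem_cons_self)]
          rw [hallk b (List.mem_cons_of_mem _ hb), hallk c0 (List.mem_cons_self)]
          simp only [Bool.false_eq_true, if_false]
          exact pvLt3_irrefl _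
      simp only [List.nil_append] at this
      rw [this]

-- ===== VERDICT (by name: the statement is the Claim_ definition above) =====
theorem choose_segment_py_spec : Claim_equal_choose_segment_py := by
  intro tc nc rows mc _
  unfold Spec_choose_segment_py choose_segment_py choose_segment_py_alt
  have hdc : ∀ col, pvDistinctB rows col = pvDistinctA rows col := fun col => pvDistinct_eq rows col
  have hcand : nc.foldl (fun acc col =>
        if some col == mc then acc
        else
          let d := pvDistinctA rows col
          if 1 < d ∧ d ≤ 8 then acc ++ [col] else acc) tc
      = tc ++ nc.filter (fun col =>
          !(some col == mc) && decide (1 < pvDistinctB rows col ∧ pvDistinctB rows col ≤ 8)) := by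
    have hstep3 : ∀ (acc : List String) (col : String), col ∈ nc →
        (if some col == mc then acc
         else
           let d := pvDistinctA rows col
           if 1 < d ∧ d ≤ 8 then acc ++ [col] else acc)
        = if (!(some col == mc) &&
            decide (1 < pvDistinctB rows col ∧ pvDistinctB rows col ≤ 8)) then acc ++ [col] else acc := by
      intro acc col _
      cases hm : (some col == mc) with
      | true => simp
      | false =>
        by_cases hp : 1 < pvDistinctA rows col ∧ pvDistinctA rows col ≤ 8 <;>
          simp [hdc, hp]
    exact (PySem.List.foldl_congr_mem _ _ _ _ hstep3).trans
      (PySem.List.foldl_append_if_eq_filter _ nc tc)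
  rw [hcand]
  exact pvPhasesA_eq rows _
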